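-- pv_equiv track=rewrite | github.com/SilasMJS/P.E.C | Sem-13-T2-SilasMalaquias/sem-13-T2-Q4-Soma-cumulativa.py | soma_Cumulativa
-- ===== SOURCE A (Python) =====
-- def soma_Cumulativa(lista):
--     lista_N = []
--     lista_N.append(lista[0])
--     soma = lista[0]
--     # estrutura de repetição
--     for i in lista[1:]:
--         soma += i
--         lista_N.append(soma)
--     return lista_N
-- ===== SOURCE B (Python) =====
-- def soma_Cumulativa(lista):
--     resto = sum(lista)
--     lista_N = []
--     for x in reversed(lista):
--         lista_N.append(resto)
--         resto -= x
--     lista_N.reverse()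
--     return lista_N
-- ===== Notes on version B (the rewrite author's own statement) =====
-- stated objective: alternative
-- what changed: B builds the cumulative list back-to-front: it takes the total sum once and walks the list reversed, recording the running remainder and subtracting each element, then reverses the result, instead of A's forward pass with an additive accumulator.
import Mathlib
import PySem

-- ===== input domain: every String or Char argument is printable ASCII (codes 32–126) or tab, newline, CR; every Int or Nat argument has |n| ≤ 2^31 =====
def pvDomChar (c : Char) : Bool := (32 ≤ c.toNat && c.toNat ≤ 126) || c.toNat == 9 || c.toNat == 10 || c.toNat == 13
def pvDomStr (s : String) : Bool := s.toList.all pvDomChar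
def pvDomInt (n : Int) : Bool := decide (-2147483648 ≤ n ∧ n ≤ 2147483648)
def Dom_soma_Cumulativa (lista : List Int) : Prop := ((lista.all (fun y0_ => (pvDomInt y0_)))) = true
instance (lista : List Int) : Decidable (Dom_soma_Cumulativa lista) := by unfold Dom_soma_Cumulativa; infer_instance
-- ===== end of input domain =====

-- B builds the cumulative list back-to-front from the total sum, subtracting each element
-- while walking the list reversed (alternative decomposition of the same O(n) task).

-- ===== PORT A =====
-- A: lista_N = [lista[0]]; soma = lista[0]; for i in lista[1:]: soma += i; lista_N.append(soma)
def soma_Cumulativa (lista : List Int) : List Int :=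
  match PySem.List.pyGet? lista 0 with
  | none => []   -- lista[0] raises IndexError on the empty list; excluded by Pre_
  | some h =>
    ((PySem.List.slice lista (some 1) none).foldl
      (fun (st : List Int × Int) i => (st.1 ++ [st.2 + i], st.2 + i)) ([h], h)).1

-- ===== PORT B =====
-- B: resto = sum(lista); for x in reversed(lista): lista_N.append(resto); resto -= x; lista_N.reverse()
def soma_Cumulativa_alt (lista : List Int) : List Int :=
  ((lista.reverse.foldl
      (fun (st : List Int × Int) x => (st.1 ++ [st.2], st.2 - x)) ([], lista.sum)).1).reverse

-- ===== PRECONDITION & SPEC =====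
-- A raises IndexError (lista[0]) on the empty list; excluded by Pre_ (B naturally returns [] there).
def Pre_soma_Cumulativa (lista : List Int) : Prop := lista ≠ []
instance (lista : List Int) : Decidable (Pre_soma_Cumulativa lista) := by unfold Pre_soma_Cumulativa; infer_instance
def pvWitness_soma_Cumulativa : List Int := ([1, -2, 3])

def Spec_soma_Cumulativa (lista : List Int) (out : List Int) : Prop := out = soma_Cumulativa_alt lista
instance (lista : List Int) (out : List Int) : Decidable (Spec_soma_Cumulativa lista out) := by unfold Spec_soma_Cumulativa; infer_instance

-- ===== CLAIM (what is proved, stated in full; the proofs are below) =====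
def Claim_equal_soma_Cumulativa : Prop := ∀ (lista : List Int), Dom_soma_Cumulativa lista → Pre_soma_Cumulativa lista → Spec_soma_Cumulativa lista (soma_Cumulativa lista)

-- ===== LEMMAS AND PROOFS =====

-- reference cumulative-sum function used only in the proofs
def pvCumul (s : Int) : List Int → List Int
  | [] => []
  | x :: xs => (s + x) :: pvCumul (s + x) xs

-- descending remainders: what B's reversed-traversal loop produces (before the final reverse)
def pvDesc (s : Int) : List Int → List Int
  | [] => []
  | x :: xs => s :: pvDesc (s - x) xs

theorem pvFoldA (t : List Int) : ∀ (acc : List Int) (s : Int),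
    (t.foldl (fun (st : List Int × Int) i => (st.1 ++ [st.2 + i], st.2 + i)) (acc, s)).1
      = acc ++ pvCumul s t := by
  induction t with
  | nil => intro acc s; simp [pvCumul]
  | cons x xs ih =>
      intro acc s
      simp only [List.foldl_cons, pvCumul]
      rw [ih (acc ++ [s + x]) (s + x)]
      simp

theorem pvFoldB (r : List Int) : ∀ (acc : List Int) (s : Int),
    (r.foldl (fun (st : List Int × Int) x => (st.1 ++ [st.2], st.2 - x)) (acc, s)).1
      = acc ++ pvDesc s r := by
  induction r with
  | nil => intro acc s; simp [pvDesc]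
  | cons x xs ih =>
      intro acc s
      simp only [List.foldl_cons, pvDesc]
      rw [ih (acc ++ [s]) (s - x)]
      simp

theorem pvDesc_append_singleton (r : List Int) : ∀ (s y : Int),
    pvDesc s (r ++ [y]) = pvDesc s r ++ [s - r.sum] := by
  induction r with
  | nil => intro s y; simp [pvDesc]
  | cons x xs ih =>
      intro s y
      simp only [List.cons_append, pvDesc, List.sum_cons]
      rw [ih (s - x) y]
      simp only [List.cons.injEq, true_and]
      congr 2
      ring

theorem pvDesc_reverse (l : List Int) : ∀ (s : Int),
    (pvDesc (s + l.sum) l.reverse).reverse = pvCumul s l := by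
  induction l with
  | nil => intro s; simp [pvDesc, pvCumul]
  | cons x xs ih =>
      intro s
      simp only [List.reverse_cons, List.sum_cons]
      rw [pvDesc_append_singleton]
      have h1 : s + (x + xs.sum) - xs.reverse.sum = s + x := by
        simp [List.sum_reverse]; ring
      have h2 : s + (x + xs.sum) = (s + x) + xs.sum := by ring
      rw [h1, h2, List.reverse_append]
      simp only [List.reverse_cons, List.reverse_nil, List.nil_append, List.singleton_append]
      rw [ih (s + x)]
      rfl

theorem soma_Cumulativa_eq_alt (lista : List Int) (h : lista ≠ []) :
    soma_Cumulativa lista = soma_Cumulativa_alt lista := by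
  rcases lista with _ | ⟨x, t⟩
  · exact absurd rfl h
  · simp only [soma_Cumulativa, soma_Cumulativa_alt, PySem.List.pyGet?_zero_cons,
      PySem.List.slice_from_one, List.tail_cons]
    rw [pvFoldA, pvFoldB]
    have := pvDesc_reverse (x :: t) 0
    rw [zero_add] at this
    simp only [List.nil_append, this, pvCumul, zero_add]
    rfl

-- ===== VERDICT (by name: the statement is the Claim_ definition above) =====
theorem soma_Cumulativa_spec : Claim_equal_soma_Cumulativa := by
  intro lista _ hpre
  exact soma_Cumulativa_eq_alt lista hpre
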